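-- pv_equiv track=rewrite | github.com/Andruixxd31/binary_search_problems | python/easy/longest_alliteration.py | solve
-- ===== SOURCE A (Python) =====
-- def solve(words):
--     csl = msl = 0
--     ll = ' '
--     for word in words:
--         if word[0] == ll:
--             csl += 1
--         else:
--             ll = word[0]
--             csl = 1
--
--         if csl > msl: msl = csl
--
--     return msl
-- ===== SOURCE B (Python) =====
-- def solve(words):
--     # boundary-index method: find the positions where a new first-letter run
--     # starts (plus both ends), then the answer is the largest gap between
--     # consecutive boundary positions
--     letters = [w[0] for w in words]
--     n = len(letters)
--     cuts = [i for i in range(n + 1)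
--             if i == 0 or i == n or letters[i] != letters[i - 1]]
--     return max((b - a for a, b in zip(cuts, cuts[1:])), default=0)
-- ===== Notes on version B (the rewrite author's own statement) =====
-- stated objective: alternative
-- what changed: B uses a boundary-index method: it extracts the first letters, computes the list of run-boundary positions with a range filter, and returns the largest difference of consecutive boundaries, instead of A's one-pass state machine threading a current/max run counter.
import Mathlib
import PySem

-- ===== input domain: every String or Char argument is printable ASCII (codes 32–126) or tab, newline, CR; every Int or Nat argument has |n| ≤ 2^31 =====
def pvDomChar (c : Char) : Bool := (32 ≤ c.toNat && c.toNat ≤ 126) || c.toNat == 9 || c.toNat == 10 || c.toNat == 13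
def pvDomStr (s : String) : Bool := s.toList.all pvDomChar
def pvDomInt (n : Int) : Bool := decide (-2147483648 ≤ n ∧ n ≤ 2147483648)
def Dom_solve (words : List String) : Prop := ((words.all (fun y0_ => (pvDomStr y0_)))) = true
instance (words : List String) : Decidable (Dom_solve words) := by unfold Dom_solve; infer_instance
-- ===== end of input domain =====

-- B replaces A's one-pass current/max run-counter state machine by a boundary-index
-- method (positions where a new first-letter run starts, answer = largest gap);
-- objective: a genuinely different algorithm of the same cost.
-- Pre_ excludes lists containing an empty-string word, on which both Pythons raise IndexError.

-- ===== PORT A =====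
-- word[0]; on "" Python raises IndexError (excluded by Pre_solve), the port uses ' ' there
def firstChar (w : String) : Char := w.toList.headD ' '

-- A's for-loop over (csl, msl, ll)
def loopA (words : List String) (st : Int × Int × Char) : Int × Int × Char :=
  words.foldl
    (fun (st : Int × Int × Char) word =>
      let csl := st.1; let msl := st.2.1; let ll := st.2.2
      let csl' := if firstChar word = ll then csl + 1 else 1
      let ll' := if firstChar word = ll then ll else firstChar word
      let msl' := if csl' > msl then csl' else msl
      (csl', msl', ll'))
    st

def solve (words : List String) : Int := (loopA words (0, 0, ' ')).2.1

-- ===== PORT B =====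
-- Source B's three stages: letters, the boundary positions `cuts` (a filtered range;
-- the pyGet? Option comparison at i = n returns True exactly as Python's
-- short-circuited `i == n or letters[i] != letters[i-1]` does), and the max of the
-- consecutive differences, with Python's max(..., default=0) as a match.
def solve_alt (words : List String) : Int :=
  let letters := words.map firstChar
  let n : Int := letters.length
  let cuts := (PySem.List.pyRange 0 (n + 1) 1).filter
      (fun i => i == 0 || i == n ||
        decide (PySem.List.pyGet? letters i ≠ PySem.List.pyGet? letters (i - 1)))
  let diffs := (List.zip cuts cuts.tail).map (fun p => p.2 - p.1)
  match diffs with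
  | [] => 0
  | x :: xs => xs.foldl max x

-- ===== PRECONDITION & SPEC =====
-- Pre_ excludes lists containing an empty-string word: both Pythons raise IndexError on word[0] there.
def Pre_solve (words : List String) : Prop := ∀ w ∈ words, w ≠ ""
instance (words : List String) : Decidable (Pre_solve words) := by unfold Pre_solve; infer_instance

def pvWitness_solve : List String := ["apple", "ant", "bear"]

def Spec_solve (words : List String) (out : Int) : Prop := out = solve_alt words
instance (words : List String) (out : Int) : Decidable (Spec_solve words out) := by unfold Spec_solve; infer_instance

-- ===== CLAIM (what is proved, stated in full; the proofs are below) =====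
def Claim_equal_solve : Prop := ∀ (words : List String), Dom_solve words → Pre_solve words → Spec_solve words (solve words)

-- ===== LEMMAS AND PROOFS =====

-- proof-side description of the consecutive run lengths over the first letters,
-- current run keyed k of length n
def runLengths (k : Char) (n : Int) : List Char → List Int
  | [] => [n]
  | c :: cs => if c = k then runLengths k (n + 1) cs else n :: runLengths c 1 cs

-- length of the leading run of k's, and the runs after it
def runLen (k : Char) : List Char → Int
  | [] => 0
  | c :: cs => if c = k then runLen k cs + 1 else 0

def restRuns (k : Char) : List Char → List Int
  | [] => []
  | c :: cs => if c = k then restRuns k cs else runLengths c 1 cs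

def runsOf : List Char → List Int
  | [] => []
  | c :: cs => runLengths c 1 cs

-- partial sums 0, r1, r1+r2, … (the boundary positions)
def scanSums (a : Int) : List Int → List Int
  | [] => [a]
  | r :: rs => a :: scanSums (a + r) rs

theorem runLen_nonneg (k : Char) (cs : List Char) : 0 ≤ runLen k cs := by
  induction cs with
  | nil => simp [runLen]
  | cons c cs ih => by_cases h : c = k <;> simp [runLen, h] <;> omega

theorem runLengths_decomp (cs : List Char) (k : Char) (n : Int) :
    runLengths k n cs = (n + runLen k cs) :: restRuns k cs := by
  induction cs generalizing k n with
  | nil => simp [runLengths, runLen, restRuns]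
  | cons c cs ih =>
      by_cases h : c = k
      · subst h
        rw [show runLengths c n (c :: cs) = runLengths c (n + 1) cs from by simp [runLengths],
          show runLen c (c :: cs) = runLen c cs + 1 from by simp [runLen],
          show restRuns c (c :: cs) = restRuns c cs from by simp [restRuns],
          ih, show n + 1 + runLen c cs = n + (runLen c cs + 1) from by omega]
      · simp [runLengths, runLen, restRuns, h]

theorem foldl_max_swap (l : List Int) (a x : Int) :
    l.foldl max (max a x) = max x (l.foldl max a) := by
  induction l generalizing a with
  | nil => simp [List.foldl, max_comm]
  | cons y l ih =>
      simp only [List.foldl]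
      rw [show max (max a x) y = max (max a y) x by rw [max_right_comm], ih]

theorem foldl_max_ge (l : List Int) (a : Int) : a ≤ l.foldl max a := by
  induction l generalizing a with
  | nil => simp [List.foldl]
  | cons y l ih => exact le_trans (le_max_left a y) (ih (max a y))

theorem foldl_max_runLengths_ge (cs : List Char) (k : Char) (n m : Int) :
    n ≤ (runLengths k n cs).foldl max m := by
  induction cs generalizing k n m with
  | nil => simp [runLengths, List.foldl]
  | cons c cs ih =>
      by_cases h : c = k
      · simpa [runLengths, h] using le_trans (by omega) (ih k (n + 1) m)
      · simp only [runLengths, h, if_false, List.foldl]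
        exact le_trans (le_max_right m n) (foldl_max_ge _ _)

-- A's msl after the loop is the max of m and the run lengths, given 1 ≤ n ≤ m
theorem loopA_eq (ws : List String) (k : Char) (n m : Int) (h1 : 1 ≤ n) (h2 : n ≤ m) :
    (loopA ws (n, m, k)).2.1 = (runLengths k n (ws.map firstChar)).foldl max m := by
  induction ws generalizing k n m with
  | nil => simp only [loopA, List.foldl, List.map_nil, runLengths, List.foldl]; omega
  | cons w ws ih =>
      by_cases h : firstChar w = k
      · simp only [loopA, List.foldl, List.map_cons, runLengths, h, if_true] at ih ⊢
        rcases le_or_gt (n + 1) m with hle | hgt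
        · rw [if_neg (by omega)]
          exact ih k (n + 1) m (by omega) hle
        · rw [if_pos (by omega), ih k (n + 1) (n + 1) (by omega) (le_refl _),
            show List.foldl max (n + 1) (runLengths k (n + 1) (ws.map firstChar))
                = List.foldl max (max m (n + 1)) (runLengths k (n + 1) (ws.map firstChar)) from by
              rw [show max m (n + 1) = n + 1 from by omega],
            foldl_max_swap]
          have := foldl_max_runLengths_ge (ws.map firstChar) k (n + 1) m
          omega
      · simp only [loopA, List.foldl, List.map_cons, runLengths, h, if_false] at ih ⊢
        rw [if_neg (by omega), show max m n = m from by omega]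
        exact ih (firstChar w) 1 m (le_refl _) (by omega)

-- consecutive differences of the partial sums recover the run lengths
theorem scanSums_cons (a : Int) (rs : List Int) :
    scanSums a rs = a :: (scanSums a rs).tail := by
  cases rs <;> simp [scanSums]

theorem diffs_scanSums (rs : List Int) (a : Int) :
    (List.zip (scanSums a rs) (scanSums a rs).tail).map (fun p => p.2 - p.1) = rs := by
  induction rs generalizing a with
  | nil => simp [scanSums]
  | cons r rs ih =>
      simp only [scanSums, List.tail_cons]
      rw [show List.zip (a :: scanSums (a + r) rs) (scanSums (a + r) rs)
            = (a, a + r) :: List.zip (scanSums (a + r) rs) (scanSums (a + r) rs).tail from by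
        conv_lhs => rw [scanSums_cons (a + r) rs]
        rw [List.zip_cons_cons, ← scanSums_cons]]
      simp only [List.map_cons, ih]
      rw [show a + r - a = r from by omega]

theorem map_add_one_scanSums (rs : List Int) (a : Int) :
    (scanSums a rs).map (fun x => x + 1) = scanSums (a + 1) rs := by
  induction rs generalizing a with
  | nil => simp [scanSums]
  | cons r rs ih =>
      simp only [scanSums, List.map_cons, ih]
      rw [show a + r + 1 = a + 1 + r from by omega]

-- shifting an integer range by 1
theorem pyRange_shift (a b : Int) :
    PySem.List.pyRange (a + 1) (b + 1) 1 = (PySem.List.pyRange a b 1).map (fun x => x + 1) := by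
  rw [PySem.List.pyRange_one, PySem.List.pyRange_one, List.map_map]
  have : b + 1 - (a + 1) = b - a := by omega
  rw [this]
  apply List.map_congr_left
  intro k _
  simp
  omega

-- the filter predicate of B's cuts
def cutP (letters : List Char) (i : Int) : Bool :=
  i == 0 || i == (letters.length : Int) ||
    decide (PySem.List.pyGet? letters i ≠ PySem.List.pyGet? letters (i - 1))

theorem pyGet?_cons_shift (c : Char) (ls : List Char) (i : Int) (h : 0 ≤ i) :
    PySem.List.pyGet? (c :: ls) (i + 1) = PySem.List.pyGet? ls i := by
  rw [PySem.List.pyGet?_of_nonneg _ (by omega : (0:Int) ≤ i + 1), PySem.List.pyGet?_of_nonneg _ h,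
    show (i + 1).toNat = i.toNat + 1 from by omega]
  simp

-- B's cuts are exactly the partial sums of the run lengths
theorem cuts_eq (letters : List Char) :
    (PySem.List.pyRange 0 ((letters.length : Int) + 1) 1).filter (cutP letters)
      = scanSums 0 (runsOf letters) := by
  induction letters with
  | nil => simp [PySem.List.pyRange_one, cutP, runsOf, scanSums, List.filter]
  | cons c ls ih =>
      have hlen : ((c :: ls).length : Int) = (ls.length : Int) + 1 := by simp
      -- split off index 0 and shift the rest of the range
      rw [PySem.List.pyRange_one_cons (by push_cast; omega : (0:Int) < ((c :: ls).length : Int) + 1),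
        show ((c :: ls).length : Int) + 1 = ((ls.length : Int) + 1) + 1 from by push_cast; omega,
        show (0 : Int) + 1 = 0 + 1 from rfl,
        pyRange_shift, List.filter_cons]
      have h0 : cutP (c :: ls) 0 = true := by simp [cutP]
      rw [if_pos h0, List.filter_map]
      -- the shifted predicate, pointwise on the range
      have hshift : ∀ i ∈ PySem.List.pyRange 0 ((ls.length : Int) + 1) 1,
          (cutP (c :: ls) ∘ (fun x => x + 1)) i
            = (if i = 0 then
                decide ((ls.length : Int) = 0)
                  || decide (PySem.List.pyGet? ls 0 ≠ some c)
              else cutP ls i) := by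
        intro i hi
        have hib := (PySem.List.mem_pyRange_one).1 hi
        by_cases hi0 : i = 0
        · subst hi0
          have hg : PySem.List.pyGet? (c :: ls) ((0:Int) + 1) = PySem.List.pyGet? ls 0 :=
            pyGet?_cons_shift c ls 0 (by omega)
          have hg0 : PySem.List.pyGet? (c :: ls) ((0:Int) + 1 - 1) = some c := by
            norm_num [PySem.List.pyGet?_zero_cons]
          simp only [Function.comp, cutP, hlen, hg, hg0, if_pos rfl]
          by_cases hl : (ls.length : Int) = 0
          · have h1 : ((0:Int) + 1 = (ls.length : Int) + 1) := by omega
            simp [hl, h1]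
          · have h1 : ¬((0:Int) + 1 = (ls.length : Int) + 1) := by omega
            have hne : ls ≠ [] := by
              intro h; subst h; simp at hl
            simp [beq_iff_eq, hl, h1, hne]
        · have h1i : 1 ≤ i := by omega
          have hg1 : PySem.List.pyGet? (c :: ls) (i + 1) = PySem.List.pyGet? ls i :=
            pyGet?_cons_shift c ls i (by omega)
          have hg2 : PySem.List.pyGet? (c :: ls) (i + 1 - 1) = PySem.List.pyGet? ls (i - 1) := by
            rw [show i + 1 - 1 = (i - 1) + 1 from by omega]
            exact pyGet?_cons_shift c ls (i - 1) (by omega)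
          simp only [Function.comp, cutP, hlen, hg1, hg2, if_neg hi0]
          have e0 : ¬(i + 1 = (0:Int)) := by omega
          by_cases h2 : i = (ls.length : Int)
          · have e1 : i + 1 = (ls.length : Int) + 1 := by omega
            simp [e0, e1, h2]
          · have e1 : ¬(i + 1 = (ls.length : Int) + 1) := by omega
            rw [show ((i + 1 : Int) == 0) = false from beq_eq_false_iff_ne.2 e0,
              show ((i + 1 : Int) == (ls.length : Int) + 1) = false from beq_eq_false_iff_ne.2 e1,
              show ((i : Int) == 0) = false from beq_eq_false_iff_ne.2 hi0,
              show ((i : Int) == (ls.length : Int)) = false from beq_eq_false_iff_ne.2 h2]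
      rw [List.filter_congr hshift]
      -- evaluate the filter with the special value at 0
      have hsplit : PySem.List.pyRange 0 ((ls.length : Int) + 1) 1
          = 0 :: PySem.List.pyRange (0 + 1) ((ls.length : Int) + 1) 1 :=
        PySem.List.pyRange_one_cons (by omega)
      have htail1 : ∀ i ∈ PySem.List.pyRange (0 + 1) ((ls.length : Int) + 1) 1,
          (if i = 0 then
              decide ((ls.length : Int) = 0) || decide (PySem.List.pyGet? ls 0 ≠ some c)
            else cutP ls i) = cutP ls i := by
        intro i hi
        have hib := (PySem.List.mem_pyRange_one).1 hi
        rw [if_neg (by omega)]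
      have hIHsplit : List.filter (cutP ls) (PySem.List.pyRange (0 + 1) ((ls.length : Int) + 1) 1)
          = (scanSums 0 (runsOf ls)).tail := by
        have := ih
        rw [hsplit, List.filter_cons, if_pos (by simp [cutP])] at this
        rw [show (scanSums 0 (runsOf ls)).tail
            = (0 :: List.filter (cutP ls) (PySem.List.pyRange (0+1) ((ls.length : Int) + 1) 1)).tail
          from by rw [this], List.tail_cons]
      rw [hsplit, List.filter_cons, List.filter_congr htail1, hIHsplit,
        if_pos (rfl : (0 : Int) = 0)]
      cases ls with
      | nil =>
          simp [runsOf, runLengths, scanSums]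
      | cons d ds =>
          have hq0 : (decide (((d :: ds).length : Int) = 0)
              || decide (PySem.List.pyGet? (d :: ds) 0 ≠ some c)) = decide (¬ d = c) := by
            rw [PySem.List.pyGet?_zero_cons]
            simp
            omega
          rw [hq0]
          by_cases hdc : d = c
          · subst hdc
            rw [if_neg (by simp)]
            rw [show runsOf (d :: d :: ds) = (2 + runLen d ds) :: restRuns d ds from by
                simp only [runsOf, runLengths, if_pos rfl]
                rw [runLengths_decomp]
                norm_num,
              show runsOf (d :: ds) = (1 + runLen d ds) :: restRuns d ds from by
                simp only [runsOf]
                rw [runLengths_decomp]]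
            simp only [scanSums, List.tail_cons]
            rw [map_add_one_scanSums,
              show (0:Int) + (1 + runLen d ds) + 1 = 0 + (2 + runLen d ds) from by omega]
          · rw [if_pos (by simp [hdc])]
            rw [show runsOf (c :: d :: ds) = 1 :: runsOf (d :: ds) from by
                simp [runsOf, runLengths, hdc]]
            rw [← scanSums_cons, map_add_one_scanSums]
            simp [scanSums]

-- cuts_eq restated with the literal filter lambda of solve_alt
theorem cuts_eq' (letters : List Char) :
    (PySem.List.pyRange 0 ((letters.length : Int) + 1) 1).filter
      (fun i => i == 0 || i == (letters.length : Int) ||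
        decide (PySem.List.pyGet? letters i ≠ PySem.List.pyGet? letters (i - 1)))
      = scanSums 0 (runsOf letters) := cuts_eq letters

theorem solve_alt_eq (words : List String) :
    solve_alt words = (match runsOf (words.map firstChar) with
      | [] => 0
      | r :: rs => rs.foldl max r) := by
  simp only [solve_alt]
  rw [cuts_eq', diffs_scanSums]

-- ===== VERDICT (by name: the statement is the Claim_ definition above) =====
theorem solve_spec : Claim_equal_solve := by
  intro words _ _
  unfold Spec_solve
  rw [solve_alt_eq]
  cases words with
  | nil => simp [solve, loopA, runsOf]
  | cons w ws =>
      have hA : solve (w :: ws)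
          = List.foldl max 1 (runLengths (firstChar w) 1 (ws.map firstChar)) := by
        have hst : loopA (w :: ws) (0, 0, ' ') = loopA ws (1, 1, firstChar w) := by
          by_cases h : firstChar w = ' ' <;> simp [loopA, List.foldl, h]
        unfold solve
        rw [hst]
        exact loopA_eq ws (firstChar w) 1 1 le_rfl le_rfl
      rw [hA,
        show runsOf ((w :: ws).map firstChar)
            = runLengths (firstChar w) 1 (ws.map firstChar) from by simp [runsOf],
        runLengths_decomp]
      simp only [List.foldl]
      rw [show max 1 (1 + runLen (firstChar w) (ws.map firstChar))
            = 1 + runLen (firstChar w) (ws.map firstChar) from by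
          have := runLen_nonneg (firstChar w) (ws.map firstChar); omega]
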